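-- pv_equiv track=rewrite | github.com/OlegGasul/Leetcode | count-square-sum-triples.py | countTriples
-- ===== SOURCE A (Python) =====
-- def countTriples(n: int) -> int:
--     squares = [i * i for i in range(1, n + 1)]
--
--     result = 0
--
--     for i in range(len(squares)):
--         a = squares[i]
--
--         for j in range(i + 1, len(squares)):
--             b = squares[j]
--
--             if a + b > squares[-1]:
--                 break
--
--             result += 2 * (a + b in squares)
--
--     return result
-- ===== SOURCE B (Python) =====
-- def countTriples(n: int) -> int:
--     result = 0
--     for c in range(1, n + 1):
--         cc = c * c
--         lo, hi = 1, c - 1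
--         while lo < hi:
--             s = lo * lo + hi * hi
--             if s == cc:
--                 result += 2
--                 lo += 1
--                 hi -= 1
--             elif s < cc:
--                 lo += 1
--             else:
--                 hi -= 1
--     return result
-- ===== Notes on version B (the rewrite author's own statement) =====
-- stated objective: faster
-- what changed: Instead of enumerating leg pairs (i<j) and testing a+b by linear membership in the squares list, B sweeps the hypotenuse c and counts leg pairs with a two-pointer scan on lo*lo+hi*hi vs c*c, removing both the squares list and the inner membership scan.
import Mathlib
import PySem

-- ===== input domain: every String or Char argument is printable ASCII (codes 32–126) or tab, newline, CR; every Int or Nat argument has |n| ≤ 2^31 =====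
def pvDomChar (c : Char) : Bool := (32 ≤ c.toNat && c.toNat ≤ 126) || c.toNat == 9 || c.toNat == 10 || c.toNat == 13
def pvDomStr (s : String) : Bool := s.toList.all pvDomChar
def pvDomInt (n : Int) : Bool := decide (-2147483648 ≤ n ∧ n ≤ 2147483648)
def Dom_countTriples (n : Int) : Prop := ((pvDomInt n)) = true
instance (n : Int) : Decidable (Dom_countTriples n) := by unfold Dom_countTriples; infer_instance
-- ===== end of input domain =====

-- B replaces A's leg-pair enumeration with linear list-membership tests by a hypotenuse-first
-- two-pointer sweep (objective: faster, O(n^2) instead of O(n^3)).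

-- ===== PORT A =====
-- inner 'for j in range(i+1, len(squares))' loop with its break, recursing over the j-list;
-- pyGetD with default 0 is exact here: every index used (j and -1) is in range when it is read.
def innerA (squares : List Int) (a : Int) (js : List Int) (result : Int) : Int :=
  match js with
  | [] => result
  | j :: rest =>
    let b := PySem.List.pyGetD squares j 0
    if a + b > PySem.List.pyGetD squares (-1) 0 then result
    else innerA squares a rest (result + 2 * (if (a + b) ∈ squares then 1 else 0))

def countTriples (n : Int) : Int :=
  let squares := (PySem.List.pyRange 1 (n + 1) 1).map (fun i => i * i)
  (PySem.List.pyRange 0 (squares.length : Int) 1).foldl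
    (fun result i =>
      let a := PySem.List.pyGetD squares i 0
      innerA squares a (PySem.List.pyRange (i + 1) (squares.length : Int) 1) result)
    0

-- ===== PORT B =====
-- the 'while lo < hi' two-pointer loop of Source B
def twoPtr (cc lo hi result : Int) : Int :=
  if h : lo < hi then
    let s := lo * lo + hi * hi
    if s = cc then twoPtr cc (lo + 1) (hi - 1) (result + 2)
    else if s < cc then twoPtr cc (lo + 1) hi result
    else twoPtr cc lo (hi - 1) result
  else result
termination_by (hi - lo).toNat
decreasing_by all_goals omega

def countTriples_alt (n : Int) : Int :=
  (PySem.List.pyRange 1 (n + 1) 1).foldl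
    (fun result c => twoPtr (c * c) 1 (c - 1) result) 0

-- ===== PRECONDITION & SPEC =====
def Spec_countTriples (n : Int) (out : Int) : Prop := out = countTriples_alt n
instance (n : Int) (out : Int) : Decidable (Spec_countTriples n out) := by unfold Spec_countTriples; infer_instance

-- ===== CLAIM (what is proved, stated in full; the proofs are below) =====
def Claim_equal_countTriples : Prop := ∀ (n : Int), Dom_countTriples n → Spec_countTriples n (countTriples n)

-- ===== LEMMAS AND PROOFS =====

-- the common counting spec both loops are reduced to
def isSqB (n x : Int) : Bool := (PySem.List.pyRange 1 (n+1) 1).any (fun c => x == c * c)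

-- squares injectivity on positives
lemma sq_inj (b c : Int) (hb : 1 ≤ b) (hc : 1 ≤ c) (h : b * b = c * c) : b = c := by
  have h2 : (b - c) * (b + c) = 0 := by ring_nf; linarith
  rcases mul_eq_zero.mp h2 with h3 | h3 <;> omega

lemma Icc_insert_left (a b : Int) (h : a ≤ b) :
    Finset.Icc a b = insert a (Finset.Icc (a + 1) b) := by
  ext x; simp [Finset.mem_Icc]; omega

-- computable interval sum (Finset.Icc on ℤ is noncomputable in this Mathlib)
def S (lo hi : Int) (f : Int → Int) : Int :=
  ∑ i ∈ Finset.range (hi + 1 - lo).toNat, f (lo + i)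

def rowA (n a' lo : Int) : Int :=
  S lo n (fun b => if isSqB n (a' + b * b) then (2:Int) else 0)

lemma sum_shift (f : Int → Int) : ∀ (N : Nat) (lo : Int),
    (∑ i ∈ Finset.range N, f (lo + i)) = ∑ b ∈ Finset.Icc lo (lo + N - 1), f b := by
  intro N
  induction N with
  | zero => intro lo; rw [Finset.range_zero, Finset.sum_empty,
      Finset.Icc_eq_empty (by omega), Finset.sum_empty]
  | succ k ih =>
    intro lo
    rw [Finset.sum_range_succ']
    have hcast : ∀ i : Nat, f (lo + (↑(i + 1) : Int)) = f ((lo + 1) + i) := by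
      intro i; congr 1; push_cast; ring
    rw [Finset.sum_congr rfl (fun i _ => hcast i), ih (lo + 1)]
    rw [Icc_insert_left lo (lo + (k+1:Nat) - 1) (by push_cast; omega),
      Finset.sum_insert (by simp [Finset.mem_Icc])]
    push_cast
    rw [add_zero, add_comm]
    have hb : lo + 1 + (k:Int) - 1 = lo + k := by ring
    have hb2 : lo + ((k:Int) + 1) - 1 = lo + k := by ring
    rw [hb, hb2]

lemma S_eq_Icc (lo hi : Int) (f : Int → Int) : S lo hi f = ∑ b ∈ Finset.Icc lo hi, f b := by
  unfold S
  rw [sum_shift]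
  by_cases h : lo ≤ hi
  · have hb : lo + (((hi + 1 - lo).toNat : Nat) : Int) - 1 = hi := by omega
    rw [hb]
  · rw [Finset.Icc_eq_empty (by omega), Finset.Icc_eq_empty (by omega)]

lemma rowA_Icc (n a' lo : Int) :
    rowA n a' lo = ∑ b ∈ Finset.Icc lo n, if isSqB n (a' + b * b) then (2:Int) else 0 :=
  S_eq_Icc _ _ _

lemma isSqB_iff (n x : Int) : isSqB n x = true ↔ ∃ c, 1 ≤ c ∧ c ≤ n ∧ x = c * c := by
  simp [isSqB, List.any_eq_true, PySem.List.mem_pyRange_one]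
  constructor
  · rintro ⟨c, hc, rfl⟩; exact ⟨c, hc.1, by omega, rfl⟩
  · rintro ⟨c, h1, h2, rfl⟩; exact ⟨c, ⟨h1, by omega⟩, rfl⟩

def TB (cc lo hi : Int) : Int :=
  S lo hi (fun a => S (a + 1) hi (fun b => if a * a + b * b = cc then (2:Int) else 0))

lemma TB_Icc (cc lo hi : Int) :
    TB cc lo hi = ∑ a ∈ Finset.Icc lo hi, ∑ b ∈ Finset.Icc (a + 1) hi,
      if a * a + b * b = cc then (2:Int) else 0 := by
  unfold TB
  rw [S_eq_Icc]
  exact Finset.sum_congr rfl fun a _ => S_eq_Icc _ _ _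

-- at most one hypotenuse: the c-sum of equality indicators is the existence indicator
lemma uniq_c (n x : Int) :
    (∑ c ∈ Finset.Icc 1 n, if x = c * c then (2:Int) else 0)
      = if isSqB n x then (2:Int) else 0 := by
  by_cases h : isSqB n x = true
  · obtain ⟨c0, h1, h2, hx⟩ := (isSqB_iff n x).mp h
    rw [Finset.sum_eq_single_of_mem c0 (Finset.mem_Icc.mpr ⟨h1, h2⟩)]
    · rw [if_pos hx, if_pos h]
    · intro b hb hne
      rw [if_neg]
      intro hxb
      exact hne (sq_inj b c0 (by simp only [Finset.mem_Icc] at hb; omega) h1 (by omega))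
  · rw [if_neg h, Finset.sum_eq_zero]
    intro c hc
    simp only [Finset.mem_Icc] at hc
    rw [if_neg]; intro hx
    exact h ((isSqB_iff n x).mpr ⟨c, hc.1, hc.2, hx⟩)

-- shrink the upper bound of a triangular double sum when vanishing above hi'
lemma shrink (lo hi hi' : Int) (h : hi' ≤ hi) (F : Int → Int → Int)
    (hv : ∀ a b, lo ≤ a → a + 1 ≤ b → b ≤ hi → hi' < b → F a b = 0) :
    (∑ a ∈ Finset.Icc lo hi, ∑ b ∈ Finset.Icc (a + 1) hi, F a b)
      = ∑ a ∈ Finset.Icc lo hi', ∑ b ∈ Finset.Icc (a + 1) hi', F a b := by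
  have step1 : ∀ a ∈ Finset.Icc lo hi,
      (∑ b ∈ Finset.Icc (a + 1) hi, F a b) = ∑ b ∈ Finset.Icc (a + 1) hi', F a b := by
    intro a ha
    simp only [Finset.mem_Icc] at ha
    rw [Finset.sum_subset (Finset.Icc_subset_Icc_right h)]
    intro b hb hb'
    simp only [Finset.mem_Icc] at hb hb'
    exact hv a b ha.1 hb.1 hb.2 (by omega)
  rw [Finset.sum_congr rfl step1]
  rw [← Finset.sum_subset (Finset.Icc_subset_Icc_right h)]
  intro a ha ha'
  simp only [Finset.mem_Icc] at ha ha'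
  apply Finset.sum_eq_zero
  intro b hb
  simp only [Finset.mem_Icc] at hb
  omega

-- ===== B side: two-pointer correctness =====
lemma TB_empty (cc lo hi : Int) (h : ¬ lo < hi) : TB cc lo hi = 0 := by
  rw [TB_Icc]
  apply Finset.sum_eq_zero
  intro a ha
  simp only [Finset.mem_Icc] at ha
  rw [Finset.Icc_eq_empty (by omega)]
  simp

lemma TB_eq_case (cc lo hi : Int) (hlo : 1 ≤ lo) (hlt : lo < hi) (hs : lo * lo + hi * hi = cc) :
    TB cc lo hi = 2 + TB cc (lo + 1) (hi - 1) := by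
  rw [TB_Icc, TB_Icc, Icc_insert_left lo hi (by omega),
    Finset.sum_insert (by simp [Finset.mem_Icc])]
  have hrow : (∑ b ∈ Finset.Icc (lo + 1) hi, if lo * lo + b * b = cc then (2:Int) else 0) = 2 := by
    rw [Finset.sum_eq_single_of_mem hi (Finset.mem_Icc.mpr ⟨by omega, le_refl hi⟩)]
    · rw [if_pos hs]
    · intro b hb hne
      simp only [Finset.mem_Icc] at hb
      rw [if_neg]; intro hb2
      exact hne (sq_inj b hi (by omega) (by omega) (by linarith))
  have hrest : (∑ a ∈ Finset.Icc (lo + 1) hi, ∑ b ∈ Finset.Icc (a + 1) hi,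
      if a * a + b * b = cc then (2:Int) else 0)
      = ∑ a ∈ Finset.Icc (lo + 1) (hi - 1), ∑ b ∈ Finset.Icc (a + 1) (hi - 1),
      if a * a + b * b = cc then (2:Int) else 0 := by
    apply shrink _ _ _ (by omega)
    intro a b ha hab hb hb'
    rw [if_neg]; intro he; nlinarith
  rw [hrow, hrest]

lemma TB_lt_case (cc lo hi : Int) (hlo : 1 ≤ lo) (hlt : lo < hi) (hs : lo * lo + hi * hi < cc) :
    TB cc lo hi = TB cc (lo + 1) hi := by
  rw [TB_Icc, TB_Icc, Icc_insert_left lo hi (by omega),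
    Finset.sum_insert (by simp [Finset.mem_Icc])]
  have hrow : (∑ b ∈ Finset.Icc (lo + 1) hi, if lo * lo + b * b = cc then (2:Int) else 0) = 0 := by
    apply Finset.sum_eq_zero
    intro b hb
    simp only [Finset.mem_Icc] at hb
    rw [if_neg]; intro hb2; nlinarith
  rw [hrow, zero_add]

lemma TB_gt_case (cc lo hi : Int) (hlo : 1 ≤ lo) (hlt : lo < hi) (hs : cc < lo * lo + hi * hi) :
    TB cc lo hi = TB cc lo (hi - 1) := by
  rw [TB_Icc, TB_Icc]
  apply shrink _ _ _ (by omega)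
  intro a b ha hab hb hb'
  rw [if_neg]; intro he; nlinarith

lemma twoPtr_eq_aux : ∀ (N : Nat) (cc lo hi r : Int), (hi - lo).toNat ≤ N → 1 ≤ lo →
    twoPtr cc lo hi r = r + TB cc lo hi := by
  intro N
  induction N with
  | zero =>
    intro cc lo hi r hN hlo
    rw [twoPtr, dif_neg (by omega), TB_empty cc lo hi (by omega), add_zero]
  | succ k ih =>
    intro cc lo hi r hN hlo
    by_cases h : lo < hi
    · rw [twoPtr, dif_pos h]
      simp only
      by_cases h1 : lo * lo + hi * hi = cc
      · rw [if_pos h1, ih cc (lo + 1) (hi - 1) (r + 2) (by omega) (by omega),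
          TB_eq_case cc lo hi hlo h h1]
        ring
      · rw [if_neg h1]
        by_cases h2 : lo * lo + hi * hi < cc
        · rw [if_pos h2, ih cc (lo + 1) hi r (by omega) (by omega),
            TB_lt_case cc lo hi hlo h h2]
        · rw [if_neg h2, ih cc lo (hi - 1) r (by omega) hlo,
            TB_gt_case cc lo hi hlo h (by omega)]
    · rw [twoPtr, dif_neg h, TB_empty cc lo hi h, add_zero]

lemma twoPtr_eq (cc lo hi r : Int) (hlo : 1 ≤ lo) : twoPtr cc lo hi r = r + TB cc lo hi :=
  twoPtr_eq_aux (hi - lo).toNat cc lo hi r (le_refl _) hlo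

-- ===== A side =====
lemma sq_getD (n i : Int) (h0 : 0 ≤ i) (h1 : i < n) :
    PySem.List.pyGetD ((PySem.List.pyRange 1 (n+1) 1).map (fun x => x*x)) i 0 = (i+1)*(i+1) := by
  have hlen : ((PySem.List.pyRange 1 (n+1) 1).map (fun x => x*x)).length = (n : Int).toNat := by
    simp [PySem.List.length_pyRange_one]
  rw [PySem.List.pyGetD_eq_getElem _ 0 h0 (by rw [hlen]; omega)]
  rw [List.getElem_map, PySem.List.getElem_pyRange_one]
  push_cast [Int.toNat_of_nonneg h0]
  ring

lemma sq_last (n : Int) (h : 1 ≤ n) :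
    PySem.List.pyGetD ((PySem.List.pyRange 1 (n+1) 1).map (fun x => x*x)) (-1) 0 = n*n := by
  have hlen : ((PySem.List.pyRange 1 (n+1) 1).map (fun x => x*x)).length = (n : Int).toNat := by
    simp [PySem.List.length_pyRange_one]
  simp only [PySem.List.pyGetD, PySem.List.pyGet?, PySem.List.pyIdx?, hlen]
  rw [if_neg (by omega), if_pos (by omega)]
  simp only [Option.bind_some, List.getElem?_map, PySem.List.getElem?_pyRange_one]
  rw [if_pos (by omega)]
  simp only [Option.map_some, Option.getD_some]
  have h2 : ((n.toNat - (-(-1:Int)).toNat : Nat) : Int) = n - 1 := by omega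
  rw [h2]; ring

lemma mem_sq (n x : Int) :
    (x ∈ (PySem.List.pyRange 1 (n+1) 1).map (fun i => i*i)) ↔ isSqB n x = true := by
  rw [isSqB_iff]
  simp only [List.mem_map, PySem.List.mem_pyRange_one]
  constructor
  · rintro ⟨c, hc, rfl⟩; exact ⟨c, hc.1, by omega, rfl⟩
  · rintro ⟨c, h1, h2, rfl⟩; exact ⟨c, ⟨h1, by omega⟩, rfl⟩

lemma rowA_zero (n a' lo : Int) (hlo : 1 ≤ lo) (hbig : n * n < a' + lo * lo) :
    rowA n a' lo = 0 := by
  rw [rowA_Icc]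
  apply Finset.sum_eq_zero
  intro b hb
  simp only [Finset.mem_Icc] at hb
  rw [if_neg]
  intro hsq
  obtain ⟨c, hc1, hc2, he⟩ := (isSqB_iff n _).mp hsq
  nlinarith

lemma rowA_step (n a' lo : Int) (h : lo ≤ n) :
    rowA n a' lo = (if isSqB n (a' + lo * lo) then (2:Int) else 0) + rowA n a' (lo + 1) := by
  rw [rowA_Icc, rowA_Icc, Icc_insert_left lo n h,
    Finset.sum_insert (by simp [Finset.mem_Icc])]

lemma rowA_empty (n a' lo : Int) (h : n < lo) : rowA n a' lo = 0 := by
  rw [rowA_Icc, Finset.Icc_eq_empty (by omega), Finset.sum_empty]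

lemma innerA_eq (n : Int) (hn : 1 ≤ n) :
    ∀ j0 a' r, 0 ≤ j0 →
      innerA ((PySem.List.pyRange 1 (n+1) 1).map (fun i => i*i)) a'
        (PySem.List.pyRange j0 n 1) r = r + rowA n a' (j0 + 1) := by
  suffices h : ∀ (N : Nat) (j0 a' r : Int), (n - j0).toNat ≤ N → 0 ≤ j0 →
      innerA ((PySem.List.pyRange 1 (n+1) 1).map (fun i => i*i)) a'
        (PySem.List.pyRange j0 n 1) r = r + rowA n a' (j0 + 1) by
    intro j0 a' r h0
    exact h (n - j0).toNat j0 a' r (le_refl _) h0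
  intro N
  induction N with
  | zero =>
    intro j0 a' r hN h0
    rw [PySem.List.pyRange_one_eq_nil (show n ≤ j0 by omega)]
    rw [innerA, rowA_empty n a' (j0 + 1) (by omega), add_zero]
  | succ k ih =>
    intro j0 a' r hN h0
    by_cases hj : j0 < n
    · rw [PySem.List.pyRange_one_cons hj]
      rw [innerA]
      simp only [sq_getD n j0 h0 hj, sq_last n hn]
      by_cases hbr : a' + (j0 + 1) * (j0 + 1) > n * n
      · rw [if_pos hbr, rowA_zero n a' (j0 + 1) (by omega) (by omega), add_zero]
      · rw [if_neg hbr, ih (j0 + 1) a' _ (by omega) (by omega)]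
        rw [rowA_step n a' (j0 + 1) (by omega)]
        have hmem : (if (a' + (j0 + 1) * (j0 + 1)) ∈
            (PySem.List.pyRange 1 (n+1) 1).map (fun i => i*i) then (1:Int) else 0)
            = if isSqB n (a' + (j0 + 1) * (j0 + 1)) then (1:Int) else 0 := by
          by_cases hm : isSqB n (a' + (j0 + 1) * (j0 + 1)) = true
          · rw [if_pos ((mem_sq n _).mpr hm), if_pos hm]
          · rw [if_neg (fun hc => hm ((mem_sq n _).mp hc)), if_neg hm]
        rw [hmem]
        split_ifs <;> ring
    · rw [PySem.List.pyRange_one_eq_nil (show n ≤ j0 by omega)]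
      rw [innerA, rowA_empty n a' (j0 + 1) (by omega), add_zero]

lemma outerA_eq (n : Int) (hn : 1 ≤ n) :
    ∀ i0 r, 0 ≤ i0 →
      (PySem.List.pyRange i0 n 1).foldl
        (fun result i =>
          innerA ((PySem.List.pyRange 1 (n+1) 1).map (fun x => x*x))
            (PySem.List.pyGetD ((PySem.List.pyRange 1 (n+1) 1).map (fun x => x*x)) i 0)
            (PySem.List.pyRange (i + 1) n 1) result) r
      = r + ∑ a ∈ Finset.Icc (i0 + 1) n, rowA n (a * a) (a + 1) := by
  suffices h : ∀ (N : Nat) (i0 r : Int), (n - i0).toNat ≤ N → 0 ≤ i0 →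
      (PySem.List.pyRange i0 n 1).foldl
        (fun result i =>
          innerA ((PySem.List.pyRange 1 (n+1) 1).map (fun x => x*x))
            (PySem.List.pyGetD ((PySem.List.pyRange 1 (n+1) 1).map (fun x => x*x)) i 0)
            (PySem.List.pyRange (i + 1) n 1) result) r
      = r + ∑ a ∈ Finset.Icc (i0 + 1) n, rowA n (a * a) (a + 1) by
    intro i0 r h0
    exact h (n - i0).toNat i0 r (le_refl _) h0
  intro N
  induction N with
  | zero =>
    intro i0 r hN h0
    rw [PySem.List.pyRange_one_eq_nil (show n ≤ i0 by omega), List.foldl_nil,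
      Finset.Icc_eq_empty (by omega), Finset.sum_empty, add_zero]
  | succ k ih =>
    intro i0 r hN h0
    by_cases hi : i0 < n
    · rw [PySem.List.pyRange_one_cons hi, List.foldl_cons]
      rw [ih (i0 + 1) _ (by omega) (by omega)]
      simp only [sq_getD n i0 h0 hi]
      rw [innerA_eq n hn (i0 + 1) _ r (by omega)]
      rw [Icc_insert_left (i0 + 1) n (by omega),
        Finset.sum_insert (by simp [Finset.mem_Icc])]
      ring
    · rw [PySem.List.pyRange_one_eq_nil (show n ≤ i0 by omega), List.foldl_nil,
        Finset.Icc_eq_empty (by omega), Finset.sum_empty, add_zero]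

-- ===== the two counting specs agree =====
lemma SA_eq_SB (n : Int) :
    (∑ a ∈ Finset.Icc 1 n, rowA n (a * a) (a + 1))
      = ∑ c ∈ Finset.Icc 1 n, TB (c * c) 1 (c - 1) := by
  have step1 : ∀ a : Int, rowA n (a * a) (a + 1)
      = ∑ c ∈ Finset.Icc 1 n, ∑ b ∈ Finset.Icc (a + 1) n,
          if a * a + b * b = c * c then (2:Int) else 0 := by
    intro a
    rw [rowA_Icc]
    rw [Finset.sum_congr rfl (fun b _ => (uniq_c n (a * a + b * b)).symm)]
    exact Finset.sum_comm
  rw [Finset.sum_congr rfl (fun a _ => step1 a), Finset.sum_comm]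
  apply Finset.sum_congr rfl
  intro c hc
  simp only [Finset.mem_Icc] at hc
  rw [TB_Icc]
  rw [shrink 1 n (c - 1) (by omega)]
  intro a b ha hab hb hb'
  rw [if_neg]; intro he; nlinarith

lemma pyRange_map_sum (lo hi : Int) (g : Int → Int) :
    ((PySem.List.pyRange lo hi 1).map g).sum = ∑ c ∈ Finset.Icc lo (hi - 1), g c := by
  rw [PySem.List.pyRange_one, List.map_map]
  have h1 : ((List.range (hi - lo).toNat).map (g ∘ fun k : Nat => lo + k)).sum
      = ∑ i ∈ Finset.range (hi - lo).toNat, g (lo + i) := rfl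
  rw [h1]
  have h2 : (hi - lo).toNat = ((hi - 1) + 1 - lo).toNat := by omega
  rw [h2, ← S, S_eq_Icc]

lemma countTriples_eq (n : Int) : countTriples n = countTriples_alt n := by
  by_cases hn : 1 ≤ n
  · simp only [countTriples, countTriples_alt]
    have hlen : ((((PySem.List.pyRange 1 (n+1) 1).map (fun i => i*i)).length : Nat) : Int) = n := by
      simp only [List.length_map, PySem.List.length_pyRange_one]
      omega
    simp only [hlen]
    rw [outerA_eq n hn 0 0 (le_refl 0), zero_add]
    rw [PySem.List.foldl_congr_mem _ _
      (fun result c => result + TB (c * c) 1 (c - 1)) 0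
      (fun acc c _ => twoPtr_eq (c * c) 1 (c - 1) acc (le_refl 1))]
    rw [PySem.List.foldl_add _ (fun c => TB (c * c) 1 (c - 1)) 0, zero_add]
    rw [pyRange_map_sum 1 (n + 1) (fun c => TB (c * c) 1 (c - 1))]
    have h3 : n + 1 - 1 = n := by ring
    rw [h3, ← SA_eq_SB n]
    norm_num
  · simp only [countTriples, countTriples_alt,
      PySem.List.pyRange_one_eq_nil (show n + 1 ≤ 1 by omega)]
    simp [PySem.List.pyRange_one_eq_nil]

-- ===== VERDICT (by name: the statement is the Claim_ definition above) =====
theorem countTriples_spec : Claim_equal_countTriples := by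
  intro n _
  unfold Spec_countTriples
  exact countTriples_eq n
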